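-- pv_equiv track=rewrite | github.com/SiChengWong/jpeg-compatible-compression-and-encryption | encrypt.py | sortListOnElemLen
-- ===== SOURCE A (Python) =====
-- def sortListOnElemLen(list_of_list):
--     """
--     sort list of list according to their length in descending order
--     :param list_of_list: list to be sorted
--     :return: sorted index
--     """
--     len_dict: dict[int, list[int]] = {}
--     for i in range(len(list_of_list)):
--         elem_len = len(list_of_list[i])
--         if elem_len not in len_dict:
--             len_dict[elem_len] = []
--         len_dict[elem_len].append(i)
--     sorted_indices = []
--     for i in sorted(len_dict, reverse=True):
--         sorted_indices += len_dict[i]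
--     return sorted_indices
-- ===== SOURCE B (Python) =====
-- def sortListOnElemLen(list_of_list):
--     """
--     sort list of list according to their length in descending order
--     :param list_of_list: list to be sorted
--     :return: sorted index
--     """
--     return sorted(range(len(list_of_list)), key=lambda i: len(list_of_list[i]), reverse=True)
-- ===== Notes on version B (the rewrite author's own statement) =====
-- stated objective: idiomatic
-- what changed: Replaced the hand-built length->indices bucket dict plus descending-key concatenation loop with a single stable comparison sort of the index range keyed by element length with reverse=True (stability preserves ascending index order on ties, matching A's bucket concatenation).
import Mathlib
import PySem

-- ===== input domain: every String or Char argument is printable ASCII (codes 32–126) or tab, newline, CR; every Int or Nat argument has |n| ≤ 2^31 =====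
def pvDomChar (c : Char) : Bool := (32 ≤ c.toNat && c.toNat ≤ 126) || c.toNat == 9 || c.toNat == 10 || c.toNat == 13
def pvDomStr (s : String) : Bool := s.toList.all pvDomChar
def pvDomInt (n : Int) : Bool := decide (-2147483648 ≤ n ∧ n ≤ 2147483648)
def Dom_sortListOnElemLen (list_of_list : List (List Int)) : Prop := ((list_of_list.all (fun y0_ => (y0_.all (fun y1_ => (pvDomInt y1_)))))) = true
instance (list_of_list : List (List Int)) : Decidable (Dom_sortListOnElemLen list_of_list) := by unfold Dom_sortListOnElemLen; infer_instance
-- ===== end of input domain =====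

-- B replaces A's length-bucket dict plus descending-key concatenation loop by one stable
-- sort of the index range keyed by element length with reverse=True (idiomatic; same result).

-- ===== PORT A =====
def sortListOnElemLen (list_of_list : List (List Int)) : List Int :=
  let len_dict : PySem.Dict Int (List Int) :=
    (PySem.List.pyRange 0 (list_of_list.length : Int) 1).foldl
      (fun d i =>
        let elem_len : Int := ((PySem.List.pyGetD list_of_list i []).length : Int)
        let d := if d.contains elem_len then d else d.insert elem_len []
        d.modify elem_len [] (fun l => l ++ [i]))
      PySem.Dict.empty
  (PySem.List.sorted len_dict.keys (fun k => k) true).foldl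
    (fun acc k => acc ++ len_dict.getD k []) []

-- ===== PORT B =====
def sortListOnElemLen_alt (list_of_list : List (List Int)) : List Int :=
  PySem.List.sorted (PySem.List.pyRange 0 (list_of_list.length : Int) 1)
    (fun i => ((PySem.List.pyGetD list_of_list i []).length : Int)) true

-- ===== PRECONDITION & SPEC =====
def Spec_sortListOnElemLen (list_of_list : List (List Int)) (out : List Int) : Prop := out = sortListOnElemLen_alt list_of_list
instance (list_of_list : List (List Int)) (out : List Int) : Decidable (Spec_sortListOnElemLen list_of_list out) := by unfold Spec_sortListOnElemLen; infer_instance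

-- ===== CLAIM (what is proved, stated in full; the proofs are below) =====
def Claim_equal_sortListOnElemLen : Prop := ∀ (list_of_list : List (List Int)), Dom_sortListOnElemLen list_of_list → Spec_sortListOnElemLen list_of_list (sortListOnElemLen list_of_list)

-- ===== LEMMAS AND PROOFS =====

-- Overwriting the same key twice equals inserting once (the second write wins, in place).
theorem dict_insert_insert_self {κ ν : Type} [BEq κ] [LawfulBEq κ]
    (d : PySem.Dict κ ν) (k : κ) (v w : ν) :
    (d.insert k v).insert k w = d.insert k w := by
  apply PySem.Dict.ext
  by_cases h : d.contains k = true
  · rw [PySem.Dict.items_insert_of_contains _ _ (by simp),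
        PySem.Dict.items_insert_of_contains _ _ h,
        PySem.Dict.items_insert_of_contains _ _ h, List.map_map]
    apply List.map_congr_left
    intro p _; by_cases hp : p.1 == k <;> simp [hp, Function.comp]
  · replace h : d.contains k = false := by simpa using h
    rw [PySem.Dict.items_insert_of_contains _ _ (by simp),
        PySem.Dict.items_insert_of_not_contains _ _ h,
        PySem.Dict.items_insert_of_not_contains _ _ h, List.map_append]
    have hne : ∀ p ∈ d.items, (p.1 == k) = false := by
      intro p hp
      by_contra hc
      have h1 : p.1 = k := by simpa using hc
      have h2 : d.contains k = true :=
        (PySem.Dict.contains_iff_mem_keys d k).2 (h1 ▸ PySem.Dict.mem_keys_of_mem_items d hp)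
      simp [h] at h2
    have hid : List.map (fun p => if (p.1 == k) = true then (k, w) else p) d.items
        = List.map id d.items := List.map_congr_left (fun p hp => by simp [hne p hp])
    rw [hid, List.map_id]
    simp

-- A's conditional "create empty bucket, then append" step is one plain modify.
theorem step_eq_modify (d : PySem.Dict Int (List Int)) (k : Int) (i : Int) :
    (if d.contains k then d else d.insert k []).modify k [] (fun l => l ++ [i])
      = d.modify k [] (fun l => l ++ [i]) := by
  by_cases h : d.contains k = true
  · simp [h]
  · replace h : d.contains k = false := by simpa using h
    simp only [h, Bool.false_eq_true, if_false, PySem.Dict.modify,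
      PySem.Dict.getD_insert_self, PySem.Dict.getD_of_not_contains _ _ h,
      dict_insert_insert_self]

-- insertBy passes over a prefix it does not go before.
theorem insertBy_append_of_forall_not (before : Int → Int → Bool) (x : Int)
    (l r : List Int) (h : ∀ e ∈ l, before x e = false) :
    PySem.List.insertBy before x (l ++ r) = l ++ PySem.List.insertBy before x r := by
  induction l with
  | nil => simp
  | cons a t ih =>
    have ha : before x a = false := h a (by simp)
    simp only [List.cons_append, PySem.List.insertBy, ha, Bool.false_eq_true, if_false]
    rw [ih (fun e he => h e (by simp [he]))]

-- insertBy goes to the front of a list it goes before everywhere.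
theorem insertBy_eq_cons_of_forall (before : Int → Int → Bool) (x : Int)
    (r : List Int) (h : ∀ e ∈ r, before x e = true) :
    PySem.List.insertBy before x r = x :: r := by
  cases r with
  | nil => simp [PySem.List.insertBy]
  | cons a t => simp [PySem.List.insertBy, h a (by simp)]

-- Stable-reverse insertion of x into a bucket decomposition (buckets in strictly
-- descending key order) appends x at the end of its own bucket.
theorem insertBy_flatMap (key : Int → Int) (x : Int) (K : List Int) (g : Int → List Int)
    (hK : K.Pairwise (fun a b => b < a)) (hx : key x ∈ K)
    (hg : ∀ k ∈ K, ∀ e ∈ g k, key e = k) :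
    PySem.List.insertBy (fun a b => decide (key b < key a)) x (K.flatMap g)
      = K.flatMap (fun k => g k ++ if key x = k then [x] else []) := by
  induction K with
  | nil => simp at hx
  | cons k K' ih =>
    rw [List.pairwise_cons] at hK
    obtain ⟨hk, hK'⟩ := hK
    by_cases hxk : key x = k
    · rw [List.flatMap_cons, insertBy_append_of_forall_not _ _ _ _
        (fun e he => by simp [hg k (by simp) e he, hxk])]
      rw [insertBy_eq_cons_of_forall _ _ _ (fun e he => by
        obtain ⟨k', hk', he'⟩ := List.mem_flatMap.1 he
        simp [hg k' (by simp [hk']) e he', hxk, hk k' hk'])]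
      rw [List.flatMap_cons, hxk]
      have hcongr : List.flatMap (fun k' => g k' ++ if k = k' then [x] else []) K'
          = List.flatMap g K' := by
        apply List.flatMap_congr
        intro k' hk'
        have : k ≠ k' := by have := hk k' hk'; omega
        simp [this]
      rw [hcongr]
      simp
    · have hx' : key x ∈ K' := by simpa [hxk] using hx
      have hlt : key x < k := hk _ hx'
      rw [List.flatMap_cons, insertBy_append_of_forall_not _ _ _ _
        (fun e he => by simp [hg k (by simp) e he]; omega)]
      rw [ih hK' hx' (fun k' h' e he => hg k' (by simp [h']) e he)]
      rw [List.flatMap_cons]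
      simp [hxk]

-- A stable reverse sort is the concatenation of the original-order buckets taken in
-- strictly descending key order (K may be any descending list covering all keys).
theorem sorted_rev_eq_flatMap_filter (key : Int → Int) (K : List Int) (xs : List Int)
    (hK : K.Pairwise (fun a b => b < a)) (hmem : ∀ x ∈ xs, key x ∈ K) :
    PySem.List.sorted xs key true = K.flatMap (fun k => xs.filter (fun x => key x == k)) := by
  induction xs using List.reverseRecOn with
  | nil => simp [PySem.List.sorted]
  | append_singleton ys x ih =>
    rw [PySem.List.sorted_rev_eq_foldl_insertBy, List.foldl_append, List.foldl_cons,
        List.foldl_nil, ← PySem.List.sorted_rev_eq_foldl_insertBy]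
    rw [ih (fun e he => hmem e (by simp [he]))]
    rw [insertBy_flatMap key x K _ hK (hmem x (by simp))
      (fun k hk e he => by simpa using (List.mem_filter.1 he).2)]
    apply List.flatMap_congr
    intro k hk
    rw [List.filter_append]
    congr 1
    by_cases h : key x = k <;> simp [h]

-- ===== VERDICT (by name: the statement is the Claim_ definition above) =====
theorem sortListOnElemLen_spec : Claim_equal_sortListOnElemLen := by
  intro ll _
  show sortListOnElemLen ll = sortListOnElemLen_alt ll
  set idxs := PySem.List.pyRange 0 (ll.length : Int) 1 with hidxs
  have hd : idxs.foldl
      (fun d i =>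
        let elem_len : Int := ((PySem.List.pyGetD ll i []).length : Int)
        let d := if d.contains elem_len then d else d.insert elem_len []
        d.modify elem_len [] (fun l => l ++ [i])) PySem.Dict.empty
      = idxs.foldl (fun d i =>
          d.modify ((PySem.List.pyGetD ll i []).length : Int) [] (fun l => l ++ [i]))
        PySem.Dict.empty := by
    apply PySem.List.foldl_congr_mem
    intro acc x _
    exact step_eq_modify acc _ x
  set D := idxs.foldl (fun d i =>
          d.modify ((PySem.List.pyGetD ll i []).length : Int) [] (fun l => l ++ [i]))
        PySem.Dict.empty with hD
  have hkeys : D.keys = PySem.Set.ofList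
      (idxs.map (fun i => ((PySem.List.pyGetD ll i []).length : Int))) := by
    rw [hD, PySem.Dict.keys_foldl_modify_key idxs
      (fun i => ((PySem.List.pyGetD ll i []).length : Int)) [] (fun _ i l => l ++ [i])]
    rfl
  have hgetD : ∀ k, D.getD k []
      = idxs.filter (fun i => ((PySem.List.pyGetD ll i []).length : Int) == k) := by
    intro k
    rw [hD, ← List.foldl_map (f := fun i => (((PySem.List.pyGetD ll i []).length : Int), i))
      (g := fun (d : PySem.Dict Int (List Int)) p => d.modify p.1 [] (fun l => l ++ [p.2]))]
    rw [PySem.Dict.getD_foldl_modify_append]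
    simp [List.filter_map, List.map_map, Function.comp_def]
  set S := PySem.Set.ofList (idxs.map (fun i => ((PySem.List.pyGetD ll i []).length : Int)))
    with hS
  set K := PySem.List.sorted S (fun k => k) true with hK
  have hKnd : K.Nodup := by
    rw [hK]
    exact (PySem.List.sorted_perm S (fun k => k) true).symm.nodup (PySem.Set.nodup_ofList _)
  have hdesc : K.Pairwise (fun a b => b < a) := by
    have hle : K.Pairwise (fun a b => b ≤ a) := PySem.List.sorted_pairwise_rev S (fun k => k)
    exact (hle.and hKnd).imp (fun h => by omega)
  have hmemK : ∀ x ∈ idxs, ((PySem.List.pyGetD ll x []).length : Int) ∈ K := by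
    intro x hx
    rw [hK, PySem.List.mem_sorted, hS, PySem.Set.mem_ofList]
    exact List.mem_map_of_mem hx
  show (PySem.List.sorted
      (idxs.foldl (fun d i =>
        let elem_len : Int := ((PySem.List.pyGetD ll i []).length : Int)
        let d := if d.contains elem_len then d else d.insert elem_len []
        d.modify elem_len [] (fun l => l ++ [i])) PySem.Dict.empty).keys (fun k => k) true).foldl
      (fun acc k => acc ++ (idxs.foldl (fun d i =>
        let elem_len : Int := ((PySem.List.pyGetD ll i []).length : Int)
        let d := if d.contains elem_len then d else d.insert elem_len []
        d.modify elem_len [] (fun l => l ++ [i])) PySem.Dict.empty).getD k []) []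
    = sortListOnElemLen_alt ll
  rw [hd, hkeys, ← hK, PySem.List.foldl_append_eq_flatMap, List.nil_append]
  rw [List.flatMap_congr (fun k _ => hgetD k)]
  rw [← sorted_rev_eq_flatMap_filter (fun i => ((PySem.List.pyGetD ll i []).length : Int))
    K idxs hdesc hmemK]
  rfl
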